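-- pv_equiv track=rewrite | github.com/PolyethereaLabs/CompanionBridge | simple_processor.py | _measure_vulnerability
-- ===== SOURCE A (Python) =====
-- def _measure_vulnerability(messages):
--     """Measure vulnerability level in messages"""
--     vulnerability_indicators = [
--         'scared', 'afraid', 'worried', 'anxious', 'vulnerable', 'hurt',
--         'pain', 'difficult', 'struggling', 'lost', 'confused', 'overwhelmed'
--     ]
--
--     content = ' '.join(msg['content'].lower() for msg in messages)
--     vulnerability_score = sum(1 for indicator in vulnerability_indicators if indicator in content)
--
--     if vulnerability_score > 10:
--         return 'high'
--     elif vulnerability_score > 5: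
--         return 'medium'
--     else:
--         return 'low'
-- ===== SOURCE B (Python) =====
-- def _measure_vulnerability(messages):
--     """Measure vulnerability level in messages"""
--     vulnerability_indicators = [
--         'scared', 'afraid', 'worried', 'anxious', 'vulnerable', 'hurt',
--         'pain', 'difficult', 'struggling', 'lost', 'confused', 'overwhelmed'
--     ]
--
--     found = set()
--     for msg in messages:
--         content = msg['content'].lower()
--         for indicator in vulnerability_indicators:
--             if indicator in content:
--                 found.add(indicator)
--
--     vulnerability_score = len(found)
--
--     if vulnerability_score > 10:
--         return 'high'
--     elif vulnerability_score > 5: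
--         return 'medium'
--     else:
--         return 'low'
-- ===== Notes on version B (the rewrite author's own statement) =====
-- stated objective: alternative
-- what changed: B never builds the joined string: it streams over the messages once, maintaining a set of indicators already seen as a substring of some message, and scores len(found); equivalence holds because the space separator blocks cross-message matches of the spaceless indicators.
import Mathlib
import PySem

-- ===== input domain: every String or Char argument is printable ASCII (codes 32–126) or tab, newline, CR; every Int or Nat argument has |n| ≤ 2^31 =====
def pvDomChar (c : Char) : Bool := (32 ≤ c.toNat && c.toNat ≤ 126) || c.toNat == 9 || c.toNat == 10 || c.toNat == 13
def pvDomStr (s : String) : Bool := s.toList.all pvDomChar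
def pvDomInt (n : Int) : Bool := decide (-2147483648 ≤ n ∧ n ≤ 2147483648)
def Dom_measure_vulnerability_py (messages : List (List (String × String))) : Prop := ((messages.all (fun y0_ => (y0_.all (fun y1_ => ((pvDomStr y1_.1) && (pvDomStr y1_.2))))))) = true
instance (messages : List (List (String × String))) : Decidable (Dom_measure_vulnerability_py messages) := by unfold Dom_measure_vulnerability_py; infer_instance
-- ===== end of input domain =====

-- B replaces A's "join all messages into one string, then scan it per indicator" by a single
-- stream over the messages that maintains the SET of indicators matched so far (score = its size).
-- Equivalence is proved: the ' ' separator blocks cross-message matches of the spaceless indicators.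

-- The indicator list both Pythons define verbatim.
def pvIndicators : List String :=
  ["scared", "afraid", "worried", "anxious", "vulnerable", "hurt",
   "pain", "difficult", "struggling", "lost", "confused", "overwhelmed"]

-- msg['content'].lower(); the default "" is never reached inside Pre_ (Python raises KeyError there).
def pvContent (m : List (String × String)) : String :=
  PySem.Str.lower (PySem.Dict.getD (PySem.Dict.mk m) "content" "")

-- ===== PORT A =====
def measure_vulnerability_py (messages : List (List (String × String))) : String :=
  let content : String := PySem.Str.join " " (messages.map (fun m => pvContent m))
  let score : Int :=
    (((pvIndicators.filter (fun indicator => PySem.Str.isIn indicator content)).map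
        (fun _ => (1 : Int))).sum)
  if score > 10 then "high" else if score > 5 then "medium" else "low"

-- ===== PORT B =====
-- inner loop of B: for indicator in vulnerability_indicators: if indicator in content: found.add(indicator)
def pvScanMsg (content : String) (found : PySem.Set String) : PySem.Set String :=
  pvIndicators.foldl
    (fun f indicator => if PySem.Str.isIn indicator content then PySem.Set.add f indicator else f)
    found

def measure_vulnerability_py_alt (messages : List (List (String × String))) : String :=
  let found : PySem.Set String :=
    messages.foldl (fun found m => pvScanMsg (pvContent m) found) PySem.Set.empty
  let score : Int := PySem.Set.len found
  if score > 10 then "high" else if score > 5 then "medium" else "low"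

-- ===== PRECONDITION & SPEC =====
-- Pre_ excludes exactly the messages lacking a 'content' key, where Python's msg['content'] raises KeyError.
def Pre_measure_vulnerability_py (messages : List (List (String × String))) : Prop :=
  (messages.all (fun m => PySem.Dict.contains (PySem.Dict.mk m) "content")) = true
instance (messages : List (List (String × String))) : Decidable (Pre_measure_vulnerability_py messages) := by unfold Pre_measure_vulnerability_py; infer_instance

def pvWitness_measure_vulnerability_py : (List (List (String × String))) :=
  [[("content", "I am scared and hurt")], [("content", "ok"), ("role", "user")]]

def Spec_measure_vulnerability_py (messages : List (List (String × String))) (out : String) : Prop := out = measure_vulnerability_py_alt messages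
instance (messages : List (List (String × String))) (out : String) : Decidable (Spec_measure_vulnerability_py messages out) := by unfold Spec_measure_vulnerability_py; infer_instance

-- ===== CLAIM (what is proved, stated in full; the proofs are below) =====
def Claim_equal_measure_vulnerability_py : Prop := ∀ (messages : List (List (String × String))), Dom_measure_vulnerability_py messages → Pre_measure_vulnerability_py messages → Spec_measure_vulnerability_py messages (measure_vulnerability_py messages)

-- ===== LEMMAS AND PROOFS =====

-- a spaceless needle that is a prefix of a ++ ' '::b is a prefix of a
theorem pv_prefix_append_cons {nd a b : List Char} {c : Char} (hc : c ∉ nd)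
    (h : nd <+: a ++ c :: b) : nd <+: a := by
  induction nd generalizing a with
  | nil => simp
  | cons y nd' ih =>
    cases a with
    | nil =>
      rw [List.nil_append, List.cons_prefix_cons] at h
      exact absurd (h.1 ▸ List.mem_cons_self) hc
    | cons x a' =>
      rw [List.cons_append, List.cons_prefix_cons] at h
      exact List.cons_prefix_cons.2 ⟨h.1, ih (fun hm => hc (List.mem_cons_of_mem _ hm)) h.2⟩

-- a needle avoiding c that is an infix of a ++ c::b lies wholly in a or wholly in b
theorem pv_infix_split {nd a b : List Char} {c : Char} (hc : c ∉ nd)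
    (h : nd <:+: a ++ c :: b) : nd <:+: a ∨ nd <:+: b := by
  induction a with
  | nil =>
    rw [List.nil_append, List.infix_cons_iff] at h
    rcases h with hp | hi
    · have : nd <+: ([] : List Char) := pv_prefix_append_cons hc (by simpa using hp)
      exact Or.inl this.isInfix
    · exact Or.inr hi
  | cons x a' ih =>
    rw [List.cons_append, List.infix_cons_iff] at h
    rcases h with hp | hi
    · exact Or.inl (pv_prefix_append_cons hc (by simpa using hp)).isInfix
    · rcases ih hi with h1 | h2
      · exact Or.inl (h1.trans ⟨[x], [], by simp⟩)
      · exact Or.inr h2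

-- the separator ' ' blocks cross-part matches of a nonempty spaceless needle
theorem pv_infix_intercalate {nd : List Char} (hne : nd ≠ []) (hsp : ' ' ∉ nd) :
    ∀ (parts : List (List Char)),
      (nd <:+: List.intercalate [' '] parts ↔ ∃ p ∈ parts, nd <:+: p) := by
  intro parts
  induction parts with
  | nil => simp [List.intercalate, hne]
  | cons p rest ih =>
    cases rest with
    | nil => simp [List.intercalate, List.intersperse]
    | cons q r =>
      have hstep : List.intercalate [' '] (p :: q :: r) =
          p ++ ' ' :: List.intercalate [' '] (q :: r) := by
        simp [List.intercalate, List.intersperse]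
      rw [hstep]
      constructor
      · intro h
        rcases pv_infix_split hsp h with h1 | h2
        · exact ⟨p, List.mem_cons_self, h1⟩
        · rcases ih.1 h2 with ⟨pp, hmem, hin⟩
          exact ⟨pp, List.mem_cons_of_mem _ hmem, hin⟩
      · rintro ⟨pp, hmem, hin⟩
        rcases List.mem_cons.1 hmem with rfl | hmem'
        · exact hin.trans ⟨[], ' ' :: List.intercalate [' '] (q :: r), by simp⟩
        · exact (ih.2 ⟨pp, hmem', hin⟩).trans ⟨p ++ [' '], [], by simp⟩

-- every indicator is nonempty and contains no space
theorem pv_indicators_ok :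
    ∀ i ∈ pvIndicators, i.toList ≠ [] ∧ ' ' ∉ i.toList := by decide

theorem pv_indicators_nodup : pvIndicators.Nodup := by decide

-- A's per-indicator test on the joined string = "some message matches"
theorem pv_isIn_join (ind : String) (hne : ind.toList ≠ []) (hsp : ' ' ∉ ind.toList)
    (msgs : List (List (String × String))) :
    (PySem.Str.isIn ind (PySem.Str.join " " (msgs.map (fun m => pvContent m))) = true) ↔
      ∃ m ∈ msgs, PySem.Str.isIn ind (pvContent m) = true := by
  rw [PySem.Str.isIn_iff_infix, PySem.Str.toList_join]
  have hsep : (" " : String).toList = [' '] := rfl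
  rw [hsep]
  show ind.toList <:+: List.intercalate [' '] _ ↔ _
  rw [pv_infix_intercalate hne hsp]
  constructor
  · rintro ⟨p, hp, hin⟩
    rcases List.mem_map.1 hp with ⟨s, hs, rfl⟩
    rcases List.mem_map.1 hs with ⟨m, hm, rfl⟩
    exact ⟨m, hm, (PySem.Str.isIn_iff_infix _ _).2 hin⟩
  · rintro ⟨m, hm, hin⟩
    refine ⟨(pvContent m).toList, ?_, (PySem.Str.isIn_iff_infix _ _).1 hin⟩
    exact List.mem_map_of_mem (List.mem_map_of_mem hm)

-- membership after B's inner loop over the indicators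
theorem pv_mem_scan (c : String) (inds : List String) (f : PySem.Set String) (y : String) :
    (y ∈ inds.foldl
        (fun f indicator => if PySem.Str.isIn indicator c then PySem.Set.add f indicator else f) f) ↔
      y ∈ f ∨ (y ∈ inds ∧ PySem.Str.isIn y c = true) := by
  induction inds generalizing f with
  | nil => simp
  | cons i rest ih =>
    simp only [List.foldl_cons]
    by_cases h : PySem.Str.isIn i c = true
    · rw [if_pos h, ih]
      rw [PySem.Set.mem_add]
      constructor
      · rintro ((hf | rfl) | ⟨hr, hy⟩)
        · exact Or.inl hf
        · exact Or.inr ⟨List.mem_cons_self, h⟩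
        · exact Or.inr ⟨List.mem_cons_of_mem _ hr, hy⟩
      · rintro (hf | ⟨hm, hy⟩)
        · exact Or.inl (Or.inl hf)
        · rcases List.mem_cons.1 hm with rfl | hr
          · exact Or.inl (Or.inr rfl)
          · exact Or.inr ⟨hr, hy⟩
    · rw [if_neg h, ih]
      constructor
      · rintro (hf | ⟨hr, hy⟩)
        · exact Or.inl hf
        · exact Or.inr ⟨List.mem_cons_of_mem _ hr, hy⟩
      · rintro (hf | ⟨hm, hy⟩)
        · exact Or.inl hf
        · rcases List.mem_cons.1 hm with rfl | hr
          · exact absurd hy h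
          · exact Or.inr ⟨hr, hy⟩

theorem pv_nodup_scan (c : String) (inds : List String) (f : PySem.Set String)
    (hf : f.Nodup) :
    (inds.foldl
        (fun f indicator => if PySem.Str.isIn indicator c then PySem.Set.add f indicator else f)
        f).Nodup := by
  induction inds generalizing f with
  | nil => exact hf
  | cons i rest ih =>
    simp only [List.foldl_cons]
    split
    · exact ih _ (PySem.Set.nodup_add f i hf)
    · exact ih _ hf

-- membership after B's outer loop over the messages
theorem pv_mem_found (msgs : List (List (String × String))) (s : PySem.Set String) (y : String) :
    (y ∈ msgs.foldl (fun found m => pvScanMsg (pvContent m) found) s) ↔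
      y ∈ s ∨ (y ∈ pvIndicators ∧ ∃ m ∈ msgs, PySem.Str.isIn y (pvContent m) = true) := by
  induction msgs generalizing s with
  | nil => simp
  | cons m rest ih =>
    simp only [List.foldl_cons]
    rw [ih, pvScanMsg, pv_mem_scan]
    constructor
    · rintro ((hs | ⟨hi, hy⟩) | ⟨hi, mm, hmm, hy⟩)
      · exact Or.inl hs
      · exact Or.inr ⟨hi, m, List.mem_cons_self, hy⟩
      · exact Or.inr ⟨hi, mm, List.mem_cons_of_mem _ hmm, hy⟩
    · rintro (hs | ⟨hi, mm, hmm, hy⟩)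
      · exact Or.inl (Or.inl hs)
      · rcases List.mem_cons.1 hmm with rfl | hr
        · exact Or.inl (Or.inr ⟨hi, hy⟩)
        · exact Or.inr ⟨hi, mm, hr, hy⟩

theorem pv_nodup_found (msgs : List (List (String × String))) (s : PySem.Set String)
    (hs : s.Nodup) :
    (msgs.foldl (fun found m => pvScanMsg (pvContent m) found) s).Nodup := by
  induction msgs generalizing s with
  | nil => exact hs
  | cons m rest ih => exact ih _ (pv_nodup_scan _ _ _ hs)

-- the two scores coincide
theorem pv_scores_eq (messages : List (List (String × String))) :
    (((pvIndicators.filter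
          (fun indicator =>
            PySem.Str.isIn indicator
              (PySem.Str.join " " (messages.map (fun m => pvContent m))))).map
        (fun _ => (1 : Int))).sum) =
      PySem.Set.len
        (messages.foldl (fun found m => pvScanMsg (pvContent m) found) PySem.Set.empty) := by
  have hperm :
      (pvIndicators.filter
          (fun indicator =>
            PySem.Str.isIn indicator
              (PySem.Str.join " " (messages.map (fun m => pvContent m))))).Perm
        (messages.foldl (fun found m => pvScanMsg (pvContent m) found) PySem.Set.empty) := by
    rw [List.perm_ext_iff_of_nodup
      (List.Nodup.filter _ pv_indicators_nodup)
      (pv_nodup_found messages PySem.Set.empty List.nodup_nil)]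
    intro y
    rw [List.mem_filter, pv_mem_found]
    simp only [PySem.Set.empty, List.not_mem_nil, false_or]
    constructor
    · rintro ⟨hy, hin⟩
      exact ⟨hy, (pv_isIn_join y (pv_indicators_ok y hy).1 (pv_indicators_ok y hy).2
        messages).1 hin⟩
    · rintro ⟨hy, hex⟩
      exact ⟨hy, (pv_isIn_join y (pv_indicators_ok y hy).1 (pv_indicators_ok y hy).2
        messages).2 hex⟩
  rw [PySem.List.sum_map_const_int, PySem.Set.len, hperm.length_eq]
  ring

-- ===== VERDICT (by name: the statement is the Claim_ definition above) =====
theorem measure_vulnerability_py_spec : Claim_equal_measure_vulnerability_py := by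
  intro messages _hdom _hpre
  unfold Spec_measure_vulnerability_py measure_vulnerability_py measure_vulnerability_py_alt
  simp only [pv_scores_eq messages]
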